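-- pv_equiv track=rewrite | github.com/rajEMNS/dmje6th | working solutions/maxSum.py | maxSumOperations
-- ===== SOURCE A (Python) =====
-- def maxSumOperations(n,index,max_sum):
--     def is_valid(value):
--         left_element = index
--         if value > left_element:
--             left_sum = (value - left_element + value - 1) * left_element //2
--         else:
--             left_sum = value * (value - 1) // 2 + (left_element - value + 1)
--
--         right_elements = n - index - 1
--         if value> right_elements:
--             right_sum = (value - right_elements + value - 1) * right_elements //2
--         else:
--             right_sum = value * (value - 1) // 2 + (right_elements - value + 1)
--
--         total = right_sum +left_sum + value
--         return total<= max_sum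
--
--     low = 1
--     high = max_sum
--     answer = 0
--     while low <= high:
--         mid = (low+high) // 2
--         if is_valid(mid):
--             answer = mid
--             low = mid+1
--         else:
--             high = mid -1
--
--     return answer
-- ===== SOURCE B (Python) =====
-- def _isqrt(m):
--     # Newton's method for the integer square root (floor), m >= 0
--     if m <= 0:
--         return 0
--     x = m
--     y = (x + m // x) // 2
--     while 0 < y < x:
--         x = y
--         y = (x + m // x) // 2
--     return x
--
--
-- def maxSumOperations(n, index, max_sum):
--     # Closed-form inversion: the minimal array sum is a piecewise arithmetic-series
--     # function of the peak value v; solve each piece analytically for the largest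
--     # feasible peak, then a boundary adjustment loop fixes integer rounding.
--     if max_sum < n:
--         return 0
--     a, b = (index, n - index - 1) if index <= n - index - 1 else (n - index - 1, index)
--
--     def cost(v):
--         # minimal array sum with arr[index] = v (every cell >= 1)
--         if v <= a + 1:
--             return (v - 1) * (v - 1) + n
--         if v <= b + 1:
--             return v * (v - 1) // 2 + v * a - a * (a + 1) // 2 + b + 1
--         return v * n - a * (a + 1) // 2 - b * (b + 1) // 2
--
--     # largest peak within each regime, solved analytically
--     cands = [min(a + 1, 1 + _isqrt(max_sum - n))]
--     d2 = (2 * a - 1) * (2 * a - 1) + 8 * (max_sum - b - 1 + a * (a + 1) // 2)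
--     if d2 >= 0:
--         cands.append(min(b + 1, max(a + 1, (_isqrt(d2) - (2 * a - 1)) // 2)))
--     cands.append(max(b + 1, (max_sum + a * (a + 1) // 2 + b * (b + 1) // 2) // n))
--     e = max([1] + [c for c in cands if cost(c) <= max_sum])
--     e = min(e, max_sum)
--     while e < max_sum and cost(e + 1) <= max_sum:
--         e += 1
--     return e
-- ===== Notes on version B (the rewrite author's own statement) =====
-- stated objective: alternative
-- what changed: Replaces the binary search over candidate peak values by a closed-form inversion: the minimal array sum is written as a piecewise arithmetic-series function of the peak, each piece is solved analytically (Newton integer sqrt) for the largest feasible peak, and a small boundary-adjustment loop fixes rounding; Pre_ admits the natural domain 0 <= index < n plus trivially infeasible budgets (max_sum < 1 and < n, both answer 0), outside which A's binary search runs over a non-monotone cost and B's arithmetic can divide by zero.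
-- outside the precondition, e.g. on maxSumOperations(0, 0, 5): A returns 5, B raises ZeroDivisionError; on maxSumOperations(2, -2, 1): A returns 1, B returns 0; on maxSumOperations(-5, -6, -5): A returns 0, B returns -5
import Mathlib
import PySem

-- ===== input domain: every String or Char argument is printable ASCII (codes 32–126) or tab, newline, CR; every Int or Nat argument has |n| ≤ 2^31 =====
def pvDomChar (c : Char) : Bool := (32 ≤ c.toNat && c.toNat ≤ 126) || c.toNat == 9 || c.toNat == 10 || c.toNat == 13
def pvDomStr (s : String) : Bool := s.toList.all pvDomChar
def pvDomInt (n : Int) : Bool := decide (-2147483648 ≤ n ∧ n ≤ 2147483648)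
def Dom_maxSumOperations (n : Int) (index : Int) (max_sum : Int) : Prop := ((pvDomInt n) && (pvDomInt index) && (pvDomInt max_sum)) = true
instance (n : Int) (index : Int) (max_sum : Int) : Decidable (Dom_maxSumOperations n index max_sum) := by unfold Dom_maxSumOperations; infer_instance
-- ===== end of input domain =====

-- B replaces A's binary search by a closed-form (arithmetic-series) inversion of the
-- minimal-sum function plus a small boundary adjustment; equivalence is proved on the
-- natural domain 0 ≤ index < n.

-- ===== PORT A =====
-- helper: the 'total' computed inside A's is_valid (is_valid(value) ⟺ total ≤ max_sum)
def pvTotalA (n : Int) (index : Int) (value : Int) : Int :=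
  let left_element := index
  let left_sum :=
    if left_element < value then
      PySem.Int.floordiv ((value - left_element + value - 1) * left_element) 2
    else
      PySem.Int.floordiv (value * (value - 1)) 2 + (left_element - value + 1)
  let right_elements := n - index - 1
  let right_sum :=
    if right_elements < value then
      PySem.Int.floordiv ((value - right_elements + value - 1) * right_elements) 2
    else
      PySem.Int.floordiv (value * (value - 1)) 2 + (right_elements - value + 1)
  right_sum + left_sum + value

-- A's while-loop: binary search on [low, high] keeping the last valid mid in answer
def pvLoopA (n : Int) (index : Int) (max_sum : Int) (low : Int) (high : Int) (answer : Int) : Int :=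
  if h : low ≤ high then
    let mid := PySem.Int.floordiv (low + high) 2
    if pvTotalA n index mid ≤ max_sum then
      pvLoopA n index max_sum (mid + 1) high mid
    else
      pvLoopA n index max_sum low (mid - 1) answer
  else answer
termination_by (high + 1 - low).toNat
decreasing_by
  · have := PySem.Int.floordiv_two_mid_bounds h
    omega
  · have := PySem.Int.floordiv_two_mid_bounds h
    omega

def maxSumOperations (n : Int) (index : Int) (max_sum : Int) : Int :=
  pvLoopA n index max_sum 1 max_sum 0

-- ===== PORT B =====
-- Newton's-method integer square root (Source B's _isqrt); exact port, loop guarded by 0 < y < x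
def pvIsqrtLoop (m : Int) (x : Int) : Int :=
  let y := PySem.Int.floordiv (x + PySem.Int.floordiv m x) 2
  if h : 0 < y ∧ y < x then pvIsqrtLoop m y else x
termination_by x.toNat
decreasing_by omega

def pvIsqrt (m : Int) : Int :=
  if m ≤ 0 then 0 else pvIsqrtLoop m m

-- Source B's cost(v): minimal array sum with peak v, as a three-piece arithmetic-series formula
def pvCostB (n : Int) (a : Int) (b : Int) (v : Int) : Int :=
  if v ≤ a + 1 then (v - 1) * (v - 1) + n
  else if v ≤ b + 1 then
    PySem.Int.floordiv (v * (v - 1)) 2 + v * a - PySem.Int.floordiv (a * (a + 1)) 2 + b + 1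
  else v * n - PySem.Int.floordiv (a * (a + 1)) 2 - PySem.Int.floordiv (b * (b + 1)) 2

-- Source B's boundary-adjustment while-loop
def pvUpB (n : Int) (a : Int) (b : Int) (max_sum : Int) (e : Int) : Int :=
  if h : e < max_sum ∧ pvCostB n a b (e + 1) ≤ max_sum then
    pvUpB n a b max_sum (e + 1)
  else e
termination_by (max_sum - e).toNat
decreasing_by omega

def maxSumOperations_alt (n : Int) (index : Int) (max_sum : Int) : Int :=
  if max_sum < n then 0
  else
    let ab := if index ≤ n - index - 1 then (index, n - index - 1) else (n - index - 1, index)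
    let a := ab.1
    let b := ab.2
    let cands := [min (a + 1) (1 + pvIsqrt (max_sum - n))]
    let d2 := (2 * a - 1) * (2 * a - 1) + 8 * (max_sum - b - 1 + PySem.Int.floordiv (a * (a + 1)) 2)
    let cands := if 0 ≤ d2 then
        cands ++ [min (b + 1) (max (a + 1) (PySem.Int.floordiv (pvIsqrt d2 - (2 * a - 1)) 2))]
      else cands
    let cands := cands ++
      [max (b + 1) (PySem.Int.floordiv (max_sum + PySem.Int.floordiv (a * (a + 1)) 2 + PySem.Int.floordiv (b * (b + 1)) 2) n)]
    let e := (cands.filter (fun c => decide (pvCostB n a b c ≤ max_sum))).foldl max 1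
    pvUpB n a b max_sum (min e max_sum)

-- ===== PRECONDITION & SPEC =====
-- Pre_ admits every input with a positive length covered by the budget (any index), the
-- natural domain (index a valid position in an array of positive length), and every input
-- with a trivially infeasible budget (max_sum below 1 and below n, where both answer 0);
-- outside it A's binary search runs over a non-monotone cost function and returns
-- accidental values (and B's arithmetic can divide by zero).
def Pre_maxSumOperations (n : Int) (index : Int) (max_sum : Int) : Prop :=
  (1 ≤ n ∧ n ≤ max_sum) ∨ (max_sum < 1 ∧ max_sum < n) ∨ (0 ≤ index ∧ index < n)
instance (n : Int) (index : Int) (max_sum : Int) : Decidable (Pre_maxSumOperations n index max_sum) := by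
  unfold Pre_maxSumOperations; infer_instance

def pvWitness_maxSumOperations : Int × Int × Int := (5, 2, 20)

def Spec_maxSumOperations (n : Int) (index : Int) (max_sum : Int) (out : Int) : Prop :=
  out = maxSumOperations_alt n index max_sum
instance (n : Int) (index : Int) (max_sum : Int) (out : Int) : Decidable (Spec_maxSumOperations n index max_sum out) := by
  unfold Spec_maxSumOperations; infer_instance

-- ===== CLAIM (what is proved, stated in full; the proofs are below) =====
def Claim_equal_maxSumOperations : Prop := ∀ (n : Int) (index : Int) (max_sum : Int), Dom_maxSumOperations n index max_sum → Pre_maxSumOperations n index max_sum → Spec_maxSumOperations n index max_sum (maxSumOperations n index max_sum)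

-- ===== LEMMAS AND PROOFS =====

lemma pv_halfk (x : Int) : ∃ k : Int, x * (x + 1) = 2 * k := by
  rcases Int.even_mul_succ_self x with ⟨k, hk⟩
  exact ⟨k, by linarith⟩

lemma pv_fdiv_even (x k : Int) (h : x = 2 * k) : PySem.Int.floordiv x 2 = k := by
  subst h; simp [PySem.Int.floordiv]

-- evaluate pvCostB with the floor divisions replaced by exact halves
lemma pv_costB_eval (n a b v kv ka kb : Int) (hkv : (v - 1) * v = 2 * kv)
    (hka : a * (a + 1) = 2 * ka) (hkb : b * (b + 1) = 2 * kb) :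
    pvCostB n a b v =
      if v ≤ a + 1 then (v - 1) * (v - 1) + n
      else if v ≤ b + 1 then kv + v * a - ka + b + 1
      else v * n - ka - kb := by
  unfold pvCostB
  rw [pv_fdiv_even (v * (v - 1)) kv (by linear_combination hkv),
    pv_fdiv_even (a * (a + 1)) ka hka, pv_fdiv_even (b * (b + 1)) kb hkb]

lemma pv_costB_one (n a b : Int) (h0 : 0 ≤ a) : pvCostB n a b 1 = n := by
  unfold pvCostB
  rw [if_pos (by omega : (1 : Int) ≤ a + 1)]
  ring

lemma pv_costB_one_le (n a b : Int) (hb : 0 ≤ b) (hab : a ≤ b) (hn : a + b + 1 = n) :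
    pvCostB n a b 1 ≤ n := by
  obtain ⟨kv, hkv⟩ := pv_halfk 0
  obtain ⟨ka, hka⟩ := pv_halfk a
  obtain ⟨kb, hkb⟩ := pv_halfk b
  rw [pv_costB_eval n a b 1 kv ka kb (by linear_combination hkv) hka hkb]
  split_ifs with h1 h2
  · nlinarith
  · nlinarith
  · nlinarith

lemma pv_costB_ge_n (n a b v : Int) (h0 : 0 ≤ a) (hab : a ≤ b) (hn : a + b + 1 = n)
    (hv : 1 ≤ v) : n ≤ pvCostB n a b v := by
  obtain ⟨kv, hkv⟩ := pv_halfk (v - 1)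
  obtain ⟨ka, hka⟩ := pv_halfk a
  obtain ⟨kb, hkb⟩ := pv_halfk b
  rw [pv_costB_eval n a b v kv ka kb (by linear_combination hkv) hka hkb]
  split_ifs with h1 h2
  · nlinarith
  · nlinarith
  · nlinarith

-- discrete convexity: the step of pvCostB is non-decreasing in v
lemma pv_costB_slope_step (n a b v : Int) (hb : 0 ≤ b) (hab : a ≤ b) (hn : a + b + 1 = n)
    (hv : 1 ≤ v) :
    pvCostB n a b (v + 1) - pvCostB n a b v ≤ pvCostB n a b (v + 2) - pvCostB n a b (v + 1) := by
  obtain ⟨kv, hkv⟩ := pv_halfk (v - 1)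
  obtain ⟨kw, hkw⟩ := pv_halfk v
  obtain ⟨kx, hkx⟩ := pv_halfk (v + 1)
  obtain ⟨ka, hka⟩ := pv_halfk a
  obtain ⟨kb, hkb⟩ := pv_halfk b
  rw [pv_costB_eval n a b v kv ka kb (by linear_combination hkv) hka hkb,
    pv_costB_eval n a b (v + 1) kw ka kb (by linear_combination hkw) hka hkb,
    pv_costB_eval n a b (v + 2) kx ka kb (by linear_combination hkx) hka hkb]
  split_ifs <;> nlinarith

lemma pv_costB_slope_mono (n a b u v : Int) (hb : 0 ≤ b) (hab : a ≤ b) (hn : a + b + 1 = n)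
    (hu : 1 ≤ u) (huv : u ≤ v) :
    pvCostB n a b (u + 1) - pvCostB n a b u ≤ pvCostB n a b (v + 1) - pvCostB n a b v := by
  obtain ⟨k, rfl⟩ : ∃ k : Nat, v = u + k := ⟨(v - u).toNat, by omega⟩
  clear huv
  induction k with
  | zero => simp
  | succ m ih =>
    have h1 := pv_costB_slope_step n a b (u + m) hb hab hn (by omega)
    have h2 : u + ((m : Int) + 1) = u + m + 1 := by ring
    calc pvCostB n a b (u + 1) - pvCostB n a b u
        ≤ pvCostB n a b (u + m + 1) - pvCostB n a b (u + m) := ih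
      _ ≤ pvCostB n a b (u + m + 1 + 1) - pvCostB n a b (u + m + 1) := by
          have h3 : u + (m : Int) + 2 = u + m + 1 + 1 := by ring
          rw [h3] at h1
          linarith
      _ = pvCostB n a b (u + (m + 1 : Nat) + 1) - pvCostB n a b (u + (m + 1 : Nat)) := by
          push_cast; ring_nf

-- telescoping: all steps on [u,v) non-negative ⇒ cost u ≤ cost v
lemma pv_tele_up (n a b u v : Int) (huv : u ≤ v)
    (h : ∀ w, u ≤ w → w < v → pvCostB n a b w ≤ pvCostB n a b (w + 1)) :
    pvCostB n a b u ≤ pvCostB n a b v := by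
  obtain ⟨k, rfl⟩ : ∃ k : Nat, v = u + k := ⟨(v - u).toNat, by omega⟩
  clear huv
  induction k with
  | zero => simp
  | succ m ih =>
    have h1 : pvCostB n a b u ≤ pvCostB n a b (u + m) :=
      ih (fun w hw1 hw2 => h w hw1 (by push_cast at hw2 ⊢; omega))
    have h2 := h (u + m) (by omega) (by push_cast; omega)
    have h3 : u + ((m : Int) + 1) = u + m + 1 := by ring
    calc pvCostB n a b u ≤ pvCostB n a b (u + m) := h1
      _ ≤ pvCostB n a b (u + m + 1) := h2
      _ = pvCostB n a b (u + (m + 1 : Nat)) := by push_cast; ring_nf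

-- telescoping: all steps on [u,v) negative ⇒ cost v ≤ cost u
lemma pv_tele_down (n a b u v : Int) (huv : u ≤ v)
    (h : ∀ w, u ≤ w → w < v → pvCostB n a b (w + 1) ≤ pvCostB n a b w) :
    pvCostB n a b v ≤ pvCostB n a b u := by
  obtain ⟨k, rfl⟩ : ∃ k : Nat, v = u + k := ⟨(v - u).toNat, by omega⟩
  clear huv
  induction k with
  | zero => simp
  | succ m ih =>
    have h1 : pvCostB n a b (u + m) ≤ pvCostB n a b u :=
      ih (fun w hw1 hw2 => h w hw1 (by push_cast at hw2 ⊢; omega))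
    have h2 := h (u + m) (by omega) (by push_cast; omega)
    calc pvCostB n a b (u + (m + 1 : Nat)) = pvCostB n a b (u + m + 1) := by push_cast; ring_nf
      _ ≤ pvCostB n a b (u + m) := h2
      _ ≤ pvCostB n a b u := h1

-- down-closedness of feasibility, given a feasible all-ones base (convexity argument)
lemma pv_costB_dc1 (n a b max_sum : Int) (hb : 0 ≤ b) (hab : a ≤ b) (hn : a + b + 1 = n)
    (h1 : pvCostB n a b 1 ≤ max_sum) :
    ∀ u v : Int, 1 ≤ u → u ≤ v → pvCostB n a b v ≤ max_sum → pvCostB n a b u ≤ max_sum := by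
  intro u v hu huv hv
  by_cases hex : ∃ w : Int, u ≤ w ∧ w < v ∧ pvCostB n a b (w + 1) < pvCostB n a b w
  · obtain ⟨w, hw1, hw2, hw3⟩ := hex
    have hdown : pvCostB n a b u ≤ pvCostB n a b 1 := by
      refine pv_tele_down n a b 1 u hu ?_
      intro w' hw1' hw2'
      have := pv_costB_slope_mono n a b w' w hb hab hn hw1' (by omega)
      linarith
    linarith
  · push_neg at hex
    have := pv_tele_up n a b u v huv (fun w hw1 hw2 => hex w hw1 hw2)
    linarith

-- A's is_valid total equals B's closed-form cost (index and n-index-1 are {a, b})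
lemma pv_totalA_eq (n index a b v : Int) (hb : 0 ≤ b) (hab : a ≤ b) (hn : a + b + 1 = n)
    (hib : (index = a ∧ n - index - 1 = b) ∨ (index = b ∧ n - index - 1 = a))
    (hv : 1 ≤ v) : pvTotalA n index v = pvCostB n a b v := by
  obtain ⟨kv, hkv⟩ := pv_halfk (v - 1)
  obtain ⟨ka, hka⟩ := pv_halfk a
  obtain ⟨kb, hkb⟩ := pv_halfk b
  rw [pv_costB_eval n a b v kv ka kb (by linear_combination hkv) hka hkb]
  simp only [pvTotalA]
  rcases hib with ⟨hi, hr⟩ | ⟨hi, hr⟩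
  · rw [hi]
    rw [show n - a - 1 = b from by omega,
      show v * (v - 1) = 2 * kv from by linear_combination hkv,
      show (v - a + v - 1) * a = 2 * (v * a - ka) from by linear_combination -hka,
      show (v - b + v - 1) * b = 2 * (v * b - kb) from by linear_combination -hkb,
      pv_fdiv_even _ _ rfl, pv_fdiv_even _ _ rfl, pv_fdiv_even _ _ rfl]
    split_ifs <;> nlinarith
  · rw [hi]
    rw [show n - b - 1 = a from by omega,
      show v * (v - 1) = 2 * kv from by linear_combination hkv,
      show (v - b + v - 1) * b = 2 * (v * b - kb) from by linear_combination -hkb,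
      show (v - a + v - 1) * a = 2 * (v * a - ka) from by linear_combination -hka,
      pv_fdiv_even _ _ rfl, pv_fdiv_even _ _ rfl, pv_fdiv_even _ _ rfl]
    split_ifs <;> nlinarith

-- the result characterisation both programs are reduced to
def pvRes (n a b max_sum f : Int) : Prop :=
  (max_sum < pvCostB n a b 1 ∧ f = 0) ∨
  (1 ≤ f ∧ f ≤ max_sum ∧ pvCostB n a b f ≤ max_sum ∧
    (f = max_sum ∨ max_sum < pvCostB n a b (f + 1)))

lemma pv_res_not_lt (n a b max_sum f g : Int)
    (hdc : ∀ u v : Int, 1 ≤ u → u ≤ v → pvCostB n a b v ≤ max_sum → pvCostB n a b u ≤ max_sum)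
    (hf : pvRes n a b max_sum f) (hg : pvRes n a b max_sum g) : ¬ f < g := by
  intro hlt
  rcases hf with ⟨hf1, rfl⟩ | ⟨hf1, hf2, hf3, hf4⟩ <;>
    rcases hg with ⟨hg1, rfl⟩ | ⟨hg1, hg2, hg3, hg4⟩
  · omega
  · have := hdc 1 g le_rfl hg1 hg3
    omega
  · omega
  · rcases hf4 with rfl | hf4
    · omega
    · have := hdc (f + 1) g (by omega) (by omega) hg3
      omega

lemma pv_res_unique (n a b max_sum f g : Int)
    (hdc : ∀ u v : Int, 1 ≤ u → u ≤ v → pvCostB n a b v ≤ max_sum → pvCostB n a b u ≤ max_sum)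
    (hf : pvRes n a b max_sum f) (hg : pvRes n a b max_sum g) : f = g := by
  have h1 := pv_res_not_lt n a b max_sum f g hdc hf hg
  have h2 := pv_res_not_lt n a b max_sum g f hdc hg hf
  omega

-- A's loop at exit (low > high): the invariant forces the characterisation
lemma pv_exit (n a b max_sum low high ans : Int)
    (hzero : max_sum < 1 → max_sum < pvCostB n a b 1)
    (hexit : high < low) (hlow : 1 ≤ low) (hhigh : high ≤ max_sum)
    (hans : (ans = 0 ∧ low = 1) ∨
      (1 ≤ ans ∧ ans = low - 1 ∧ ans ≤ max_sum ∧ pvCostB n a b ans ≤ max_sum))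
    (hHigh : ∀ v, high < v → v ≤ max_sum → max_sum < pvCostB n a b v) :
    pvRes n a b max_sum ans := by
  rcases hans with ⟨rfl, rfl⟩ | ⟨h1, h2, h3, h4⟩
  · by_cases hs : 1 ≤ max_sum
    · exact Or.inl ⟨hHigh 1 (by omega) hs, rfl⟩
    · exact Or.inl ⟨hzero (by omega), rfl⟩
  · refine Or.inr ⟨h1, h3, h4, ?_⟩
    by_cases hls : low ≤ max_sum
    · right
      have := hHigh low (by omega) hls
      rw [show ans + 1 = low from by omega]
      exact this
    · left; omega

-- A's binary search satisfies the characterisation (invariant-carrying induction)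
lemma pv_loopA_res (n index a b max_sum : Int) (hb : 0 ≤ b) (hab : a ≤ b) (hn : a + b + 1 = n)
    (hib : (index = a ∧ n - index - 1 = b) ∨ (index = b ∧ n - index - 1 = a))
    (hdc : ∀ u v : Int, 1 ≤ u → u ≤ v → pvCostB n a b v ≤ max_sum → pvCostB n a b u ≤ max_sum)
    (hzero : max_sum < 1 → max_sum < pvCostB n a b 1) :
    ∀ (m : Nat) (low high ans : Int), (high + 1 - low).toNat ≤ m → 1 ≤ low → high ≤ max_sum →
    ((ans = 0 ∧ low = 1) ∨
      (1 ≤ ans ∧ ans = low - 1 ∧ ans ≤ max_sum ∧ pvCostB n a b ans ≤ max_sum)) →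
    (∀ v, high < v → v ≤ max_sum → max_sum < pvCostB n a b v) →
    pvRes n a b max_sum (pvLoopA n index max_sum low high ans) := by
  intro m
  induction m with
  | zero =>
    intro low high ans hm hlow hhigh hans hHigh
    rw [pvLoopA, dif_neg (by omega : ¬ low ≤ high)]
    exact pv_exit n a b max_sum low high ans hzero (by omega) hlow hhigh hans hHigh
  | succ m ih =>
    intro low high ans hm hlow hhigh hans hHigh
    rw [pvLoopA]
    by_cases hlh : low ≤ high
    · rw [dif_pos hlh]
      have hmid := PySem.Int.floordiv_two_mid_bounds hlh
      dsimp only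
      split_ifs with hv
      · -- valid mid: answer := mid, low := mid + 1
        rw [pv_totalA_eq n index a b _ hb hab hn hib (by omega)] at hv
        exact ih (PySem.Int.floordiv (low + high) 2 + 1) high _ (by omega) (by omega) hhigh
          (Or.inr ⟨by omega, by omega, by omega, hv⟩) hHigh
      · -- invalid mid: high := mid - 1
        rw [pv_totalA_eq n index a b _ hb hab hn hib (by omega)] at hv
        refine ih low (PySem.Int.floordiv (low + high) 2 - 1) ans (by omega) hlow (by omega) hans ?_
        intro v hv1 hv2
        by_cases hvh : high < v
        · exact hHigh v hvh hv2
        · by_contra hcon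
          exact hv (hdc (PySem.Int.floordiv (low + high) 2) v (by omega) (by omega) (by omega))
    · rw [dif_neg hlh]
      exact pv_exit n a b max_sum low high ans hzero (by omega) hlow hhigh hans hHigh

-- B's adjustment loop satisfies the characterisation
lemma pv_upB_res (n a b max_sum : Int) :
    ∀ (m : Nat) (e : Int), (max_sum - e).toNat ≤ m → 1 ≤ e → e ≤ max_sum →
    pvCostB n a b e ≤ max_sum →
    pvRes n a b max_sum (pvUpB n a b max_sum e) := by
  intro m
  induction m with
  | zero =>
    intro e hm h1 he hc
    rw [pvUpB, dif_neg (by omega)]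
    exact Or.inr ⟨h1, he, hc, Or.inl (by omega)⟩
  | succ m ih =>
    intro e hm h1 he hc
    rw [pvUpB]
    by_cases h : e < max_sum ∧ pvCostB n a b (e + 1) ≤ max_sum
    · rw [dif_pos h]
      exact ih (e + 1) (by omega) (by omega) (by omega) h.2
    · rw [dif_neg h]
      refine Or.inr ⟨h1, he, hc, ?_⟩
      by_cases hes : e < max_sum
      · right; omega
      · left; omega

lemma pv_le_foldl_max : ∀ (xs : List Int) (x : Int), x ≤ xs.foldl max x
  | [], _ => le_refl _
  | y :: ys, x => le_trans (le_max_left x y) (pv_le_foldl_max ys (max x y))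

lemma pv_foldl_max_mem : ∀ (xs : List Int) (x : Int), xs.foldl max x = x ∨ xs.foldl max x ∈ xs
  | [], _ => Or.inl rfl
  | y :: ys, x => by
    rcases pv_foldl_max_mem ys (max x y) with h | h
    · simp only [List.foldl_cons, h]
      rcases max_choice x y with h' | h'
      · exact Or.inl h'
      · exact Or.inr (by simp [h'])
    · exact Or.inr (by simp [List.foldl_cons]; right; exact h)

-- B's result satisfies the characterisation
lemma pv_altB_res (n index max_sum a b : Int) (hn1 : 1 ≤ n) (hb : 0 ≤ b) (hab : a ≤ b) (hn : a + b + 1 = n)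
    (hdc : ∀ u v : Int, 1 ≤ u → u ≤ v → pvCostB n a b v ≤ max_sum → pvCostB n a b u ≤ max_sum)
    (hzero : max_sum < n → max_sum < pvCostB n a b 1)
    (habeq : (if index ≤ n - index - 1 then (index, n - index - 1) else (n - index - 1, index)) = (a, b)) :
    pvRes n a b max_sum (maxSumOperations_alt n index max_sum) := by
  by_cases hsn : max_sum < n
  · unfold maxSumOperations_alt
    rw [if_pos hsn]
    exact Or.inl ⟨hzero hsn, rfl⟩
  · simp only [maxSumOperations_alt, if_neg hsn, habeq]
    set l := (if 0 ≤ (2 * a - 1) * (2 * a - 1) + 8 * (max_sum - b - 1 + PySem.Int.floordiv (a * (a + 1)) 2) then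
        [min (a + 1) (1 + pvIsqrt (max_sum - n))] ++
          [min (b + 1) (max (a + 1) (PySem.Int.floordiv (pvIsqrt ((2 * a - 1) * (2 * a - 1) + 8 * (max_sum - b - 1 + PySem.Int.floordiv (a * (a + 1)) 2)) - (2 * a - 1)) 2))]
      else [min (a + 1) (1 + pvIsqrt (max_sum - n))]) ++
      [max (b + 1) (PySem.Int.floordiv (max_sum + PySem.Int.floordiv (a * (a + 1)) 2 + PySem.Int.floordiv (b * (b + 1)) 2) n)] with hl
    set lf := l.filter (fun c => decide (pvCostB n a b c ≤ max_sum)) with hlf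
    have hs1 : 1 ≤ max_sum := by omega
    have hE1 : (1 : Int) ≤ lf.foldl max 1 := pv_le_foldl_max lf 1
    have hEcost : pvCostB n a b (lf.foldl max 1) ≤ max_sum := by
      rcases pv_foldl_max_mem lf 1 with he | he
      · rw [he]
        have := pv_costB_one_le n a b hb hab hn
        omega
      · have := List.mem_filter.mp (hlf ▸ he)
        exact of_decide_eq_true this.2
    have hcost : pvCostB n a b (min (lf.foldl max 1) max_sum) ≤ max_sum := by
      rcases le_total (lf.foldl max 1) max_sum with hle | hle
      · rwa [min_eq_left hle]
      · rw [min_eq_right hle]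
        exact hdc max_sum (lf.foldl max 1) hs1 hle hEcost
    exact pv_upB_res n a b max_sum (max_sum - min (lf.foldl max 1) max_sum).toNat _ le_rfl
      (by omega) (by omega) hcost

-- A's result satisfies the characterisation
lemma pv_A_res (n index max_sum a b : Int) (hb : 0 ≤ b) (hab : a ≤ b) (hn : a + b + 1 = n)
    (hib : (index = a ∧ n - index - 1 = b) ∨ (index = b ∧ n - index - 1 = a))
    (hdc : ∀ u v : Int, 1 ≤ u → u ≤ v → pvCostB n a b v ≤ max_sum → pvCostB n a b u ≤ max_sum)
    (hzero : max_sum < 1 → max_sum < pvCostB n a b 1) :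
    pvRes n a b max_sum (maxSumOperations n index max_sum) := by
  unfold maxSumOperations
  refine pv_loopA_res n index a b max_sum hb hab hn hib hdc hzero (max_sum + 1 - 1).toNat
    1 max_sum 0 le_rfl le_rfl le_rfl (Or.inl ⟨rfl, rfl⟩) ?_
  intro v hv1 hv2
  omega

-- both characterisations plus uniqueness give the equality, for the a/b pair at hand
lemma pv_main (n index max_sum a b : Int) (hn1 : 1 ≤ n) (hb : 0 ≤ b) (hab : a ≤ b) (hn : a + b + 1 = n)
    (hib : (index = a ∧ n - index - 1 = b) ∨ (index = b ∧ n - index - 1 = a))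
    (hdc : ∀ u v : Int, 1 ≤ u → u ≤ v → pvCostB n a b v ≤ max_sum → pvCostB n a b u ≤ max_sum)
    (hzero : max_sum < n → max_sum < pvCostB n a b 1) :
    maxSumOperations n index max_sum = maxSumOperations_alt n index max_sum := by
  have h1n : max_sum < 1 → max_sum < pvCostB n a b 1 := fun h => hzero (by omega)
  have habeq : (if index ≤ n - index - 1 then (index, n - index - 1) else (n - index - 1, index)) = (a, b) := by
    rcases hib with ⟨hi, hr⟩ | ⟨hi, hr⟩
    · rw [if_pos (show index ≤ n - index - 1 from by omega), hi,
        show n - a - 1 = b from by omega]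
    · by_cases hd : index ≤ n - index - 1
      · have hab2 : a = b := by omega
        rw [if_pos hd, hi, show n - b - 1 = a from by omega, hab2]
      · rw [if_neg hd, hi, show n - b - 1 = a from by omega]
  exact pv_res_unique n a b max_sum _ _ hdc
    (pv_A_res n index max_sum a b hb hab hn hib hdc h1n)
    (pv_altB_res n index max_sum a b hn1 hb hab hn hdc hzero habeq)

-- ===== VERDICT (by name: the statement is the Claim_ definition above) =====
theorem maxSumOperations_spec : Claim_equal_maxSumOperations := by
  intro n index max_sum hDom hPre
  unfold Spec_maxSumOperations
  -- the trivially infeasible budget region: A's loop never runs, B returns 0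
  by_cases htriv : max_sum < 1 ∧ max_sum < n
  · unfold maxSumOperations maxSumOperations_alt
    rw [pvLoopA, dif_neg (by omega : ¬ (1 : Int) ≤ max_sum), if_pos htriv.2]
  -- otherwise fix the sorted arm pair (a, b) and apply the main lemma
  obtain ⟨a, b, hab, hib⟩ :
      ∃ a b : Int, a ≤ b ∧
        ((index = a ∧ n - index - 1 = b) ∨ (index = b ∧ n - index - 1 = a)) := by
    rcases le_total index (n - index - 1) with h | h
    · exact ⟨index, n - index - 1, h, Or.inl ⟨rfl, rfl⟩⟩
    · exact ⟨n - index - 1, index, h, Or.inr ⟨rfl, rfl⟩⟩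
  have hn : a + b + 1 = n := by omega
  have h1n : 1 ≤ n := by
    rcases hPre with ⟨h1, _⟩ | ⟨h1, h2⟩ | ⟨h1, h2⟩ <;> omega
  have hb : 0 ≤ b := by omega
  by_cases hcase : n ≤ max_sum
  · -- budget covers the all-ones array: feasibility is down-closed by convexity
    have hone : pvCostB n a b 1 ≤ max_sum :=
      le_trans (pv_costB_one_le n a b hb hab hn) hcase
    exact pv_main n index max_sum a b h1n hb hab hn hib
      (pv_costB_dc1 n a b max_sum hb hab hn hone) (fun h => absurd hcase (by omega))
  · -- budget below n: Pre_ forces the natural domain, where every cost is at least n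
    have h0a : 0 ≤ a := by
      rcases hPre with ⟨h1, h2⟩ | ⟨h1, h2⟩ | ⟨h1, h2⟩
      · exact absurd h2 hcase
      · exact absurd ⟨h1, h2⟩ htriv
      · rcases hib with ⟨hi, hr⟩ | ⟨hi, hr⟩ <;> omega
    refine pv_main n index max_sum a b h1n hb hab hn hib ?_ ?_
    · intro u v hu huv hv
      have := pv_costB_ge_n n a b v h0a hab hn (by omega)
      omega
    · intro h
      rw [pv_costB_one n a b h0a]
      omega
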